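-- pv_equiv track=rewrite | github.com/JonathanFraser/aoc2023 | day7/solve.py | order_value
-- ===== SOURCE A (Python) =====
-- basic_symbols = "23456789TJQKA"
--
-- joker_symbols = "J23456789TQKA"
--
-- def order_value(hand:str,joker_rules=False):
--     if hand == "":
--         return 0
--     if joker_rules:
--         value = joker_symbols.find(hand[-1])
--     else:
--         value = basic_symbols.find(hand[-1])
--     return order_value(hand[:-1],joker_rules=joker_rules)*13+value
-- ===== SOURCE B (Python) =====
-- basic_symbols = "23456789TJQKA"
--
-- joker_symbols = "J23456789TQKA"
--
-- def order_value(hand: str, joker_rules=False):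
--     symbols = joker_symbols if joker_rules else basic_symbols
--     value = 0
--     for c in hand:
--         value = value * 13 + symbols.find(c)
--     return value
-- ===== Notes on version B (the rewrite author's own statement) =====
-- stated objective: faster
-- what changed: Replaces the right-to-left recursion with slicing by a single left-to-right accumulating loop (value = value*13 + symbols.find(c)), selecting the symbol table once.
import Mathlib
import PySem

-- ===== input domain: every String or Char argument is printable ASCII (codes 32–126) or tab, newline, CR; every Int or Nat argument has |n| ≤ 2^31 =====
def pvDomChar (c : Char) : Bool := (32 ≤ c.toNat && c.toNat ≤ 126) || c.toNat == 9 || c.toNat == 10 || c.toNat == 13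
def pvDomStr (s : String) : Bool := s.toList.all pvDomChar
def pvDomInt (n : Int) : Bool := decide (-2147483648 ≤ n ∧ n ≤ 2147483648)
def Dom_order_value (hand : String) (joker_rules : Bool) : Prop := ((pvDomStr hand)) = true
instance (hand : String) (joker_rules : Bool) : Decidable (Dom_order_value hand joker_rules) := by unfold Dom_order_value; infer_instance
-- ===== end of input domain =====

-- B replaces A's right-to-left recursion (hand[:-1], hand[-1]) by one forward
-- accumulating loop over the characters; simpler, same return value everywhere.

-- ===== PORT A =====
def pvBasicSymbols : List Char := "23456789TJQKA".toList
def pvJokerSymbols : List Char := "J23456789TQKA".toList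

def pvOvA (cs : List Char) (joker_rules : Bool) : Int :=
  if h : cs = [] then 0
  else
    let value : Int :=
      if joker_rules then PySem.Chars.find pvJokerSymbols [cs.getLast h]
      else PySem.Chars.find pvBasicSymbols [cs.getLast h]
    pvOvA cs.dropLast joker_rules * 13 + value
termination_by cs.length
decreasing_by
  have : cs ≠ [] := h
  simp [List.length_dropLast]
  exact List.length_pos_iff.mpr this

def order_value (hand : String) (joker_rules : Bool) : Int :=
  pvOvA hand.toList joker_rules

-- ===== PORT B =====
def order_value_alt (hand : String) (joker_rules : Bool) : Int :=
  let symbols : List Char := if joker_rules then pvJokerSymbols else pvBasicSymbols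
  hand.toList.foldl (fun v c => v * 13 + PySem.Chars.find symbols [c]) 0

-- ===== PRECONDITION & SPEC =====
def Spec_order_value (hand : String) (joker_rules : Bool) (out : Int) : Prop := out = order_value_alt hand joker_rules
instance (hand : String) (joker_rules : Bool) (out : Int) : Decidable (Spec_order_value hand joker_rules out) := by unfold Spec_order_value; infer_instance

-- ===== CLAIM (what is proved, stated in full; the proofs are below) =====
def Claim_equal_order_value : Prop := ∀ (hand : String) (joker_rules : Bool), Dom_order_value hand joker_rules → Spec_order_value hand joker_rules (order_value hand joker_rules)

-- ===== LEMMAS AND PROOFS =====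

-- ===== VERDICT (by name: the statement is the Claim_ definition above) =====
lemma pvOvA_eq_foldl (joker_rules : Bool) (cs : List Char) :
    pvOvA cs joker_rules =
      cs.foldl (fun v c => v * 13 +
        PySem.Chars.find (if joker_rules then pvJokerSymbols else pvBasicSymbols) [c]) 0 := by
  induction cs using List.reverseRecOn with
  | nil => simp [pvOvA]
  | append_singleton cs c ih =>
      rw [pvOvA]
      simp only [List.dropLast_concat, List.getLast_concat, List.foldl_append, List.foldl_cons,
        List.foldl_nil, ih]
      cases joker_rules <;> simp

theorem order_value_spec : Claim_equal_order_value := by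
  intro hand joker_rules _
  unfold Spec_order_value order_value order_value_alt
  exact pvOvA_eq_foldl joker_rules hand.toList
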